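-- pv_equiv track=rewrite | github.com/k5sano/patent-compare | modules/cited_ref_notation.py | _format_para_list
-- ===== SOURCE A (Python) =====
-- from typing import Iterable
--
-- def _format_para_list(xs: Iterable[int]) -> str:
--     """段落番号は4桁ゼロ埋め: 20 → 【0020】"""
--     xs = list(xs)
--     if not xs:
--         return ""
--     runs: list[tuple[int, int]] = []
--     a = b = xs[0]
--     for x in xs[1:]:
--         if x == b + 1:
--             b = x
--         else:
--             runs.append((a, b))
--             a = b = x
--     runs.append((a, b))
--     parts = []
--     for s, e in runs:
--         if s == e:
--             parts.append(f"【{s:04d}】")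
--         else:
--             parts.append(f"【{s:04d}】〜【{e:04d}】")
--     return "".join(parts) if all(s == e for s, e in runs) else "、".join(parts)
-- ===== SOURCE B (Python) =====
-- from typing import Iterable
--
-- def _format_para_list(xs: Iterable[int]) -> str:
--     """段落番号は4桁ゼロ埋め: 20 → 【0020】"""
--     # Scan right-to-left; rev_runs holds the runs in reversed order (the
--     # "current" run is rev_runs[-1]): either extend its start downwards or
--     # open a new singleton run.
--     rev_runs: list[tuple[int, int]] = []
--     for x in reversed(list(xs)):
--         if rev_runs and rev_runs[-1][0] == x + 1:
--             rev_runs[-1] = (x, rev_runs[-1][1])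
--         else:
--             rev_runs.append((x, x))
--     if not rev_runs:
--         return ""
--     runs = rev_runs[::-1]
--     sep = "" if all(s == e for s, e in runs) else "、"
--     return sep.join(
--         f"【{s:04d}】" if s == e else f"【{s:04d}】〜【{e:04d}】" for s, e in runs
--     )
-- ===== Notes on version B (the rewrite author's own statement) =====
-- stated objective: alternative
-- what changed: Runs are built back-to-front by a single right-to-left fold that prepends a new singleton run or extends the first run's start, replacing A's left-to-right loop with a/b boundary state and a trailing append; the two join branches collapse into one join with a chosen separator.
import Mathlib
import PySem

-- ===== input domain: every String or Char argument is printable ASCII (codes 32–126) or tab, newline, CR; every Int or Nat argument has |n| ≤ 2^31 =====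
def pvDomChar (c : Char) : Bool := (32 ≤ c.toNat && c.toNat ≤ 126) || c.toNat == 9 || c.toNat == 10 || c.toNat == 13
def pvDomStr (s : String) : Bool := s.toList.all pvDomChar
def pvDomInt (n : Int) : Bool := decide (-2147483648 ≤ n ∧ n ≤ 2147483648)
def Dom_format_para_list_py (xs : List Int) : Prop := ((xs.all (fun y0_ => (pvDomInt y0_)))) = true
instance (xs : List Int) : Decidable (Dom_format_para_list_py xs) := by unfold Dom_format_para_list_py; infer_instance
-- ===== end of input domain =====

-- B re-decomposes A: runs are built back-to-front by a right fold (prepend/extend the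
-- first run) instead of A's left loop with a/b boundary state plus a final append, and the
-- two joins collapse into one join with a chosen separator. Objective: alternative.
-- ===== PORT A =====
-- f"{n:04d}" == str(n).zfill(4) exactly (zero-fill to width 4, sign stays in front)
def pvFmt04 (n : Int) : String := PySem.Str.zfill (PySem.Int.toStr n) 4

-- the run-collecting loop of A: state a, b, accumulated runs
def pvRunsA (a b : Int) (l : List Int) (acc : List (Int × Int)) : List (Int × Int) :=
  match l with
  | [] => acc ++ [(a, b)]
  | x :: t => if x = b + 1 then pvRunsA a x t acc else pvRunsA x x t (acc ++ [(a, b)])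

def format_para_list_py (xs : List Int) : String :=
  match xs with
  | [] => ""
  | x0 :: rest =>
    let runs := pvRunsA x0 x0 rest []
    let parts := runs.foldl (fun ps (se : Int × Int) =>
      if se.1 = se.2 then ps ++ ["【" ++ pvFmt04 se.1 ++ "】"]
      else ps ++ ["【" ++ pvFmt04 se.1 ++ "】〜【" ++ pvFmt04 se.2 ++ "】"]) []
    if runs.all (fun se => se.1 == se.2) then PySem.Str.join "" parts
    else PySem.Str.join "、" parts

-- ===== PORT B =====
-- one step of B's right-to-left loop: open a new singleton run or extend the current
-- run's start downwards. Source B keeps the run list in REVERSED order (the current run at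
-- the end, appended/updated there, reversed once after the loop); the port keeps it in
-- final order (the current run at the head) — the identical steps on the mirrored list,
-- so the loop is exactly List.foldr of this step and the final [::-1] is absorbed.
def pvAddRun (x : Int) (rs : List (Int × Int)) : List (Int × Int) :=
  match rs with
  | (s, e) :: t => if s = x + 1 then (x, e) :: t else (x, x) :: (s, e) :: t
  | [] => [(x, x)]

def format_para_list_py_alt (xs : List Int) : String :=
  let runs := xs.foldr pvAddRun []
  match runs with
  | [] => ""
  | _ =>
    let sep := if runs.all (fun se => se.1 == se.2) then "" else "、"
    PySem.Str.join sep (runs.map (fun se =>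
      if se.1 = se.2 then "【" ++ pvFmt04 se.1 ++ "】"
      else "【" ++ pvFmt04 se.1 ++ "】〜【" ++ pvFmt04 se.2 ++ "】"))

-- ===== PRECONDITION & SPEC =====
def Spec_format_para_list_py (xs : List Int) (out : String) : Prop := out = format_para_list_py_alt xs
instance (xs : List Int) (out : String) : Decidable (Spec_format_para_list_py xs out) := by unfold Spec_format_para_list_py; infer_instance

-- ===== CLAIM (what is proved, stated in full; the proofs are below) =====
def Claim_equal_format_para_list_py : Prop := ∀ (xs : List Int), Dom_format_para_list_py xs → Spec_format_para_list_py xs (format_para_list_py xs)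

-- ===== LEMMAS AND PROOFS =====

-- closing the current run (a, b) against an already-built run list
def pvGlue (a b : Int) (rs : List (Int × Int)) : List (Int × Int) :=
  match rs with
  | (s, e) :: t => if s = b + 1 then (a, e) :: t else (a, b) :: (s, e) :: t
  | [] => [(a, b)]

theorem pvAddRun_eq_glue (x : Int) (rs : List (Int × Int)) : pvAddRun x rs = pvGlue x x rs := by
  cases rs with
  | nil => rfl
  | cons p t => cases p; rfl

theorem pvRunsA_acc (l : List Int) : ∀ (a b : Int) (acc : List (Int × Int)),
    pvRunsA a b l acc = acc ++ pvRunsA a b l [] := by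
  induction l with
  | nil => intro a b acc; simp [pvRunsA]
  | cons x t ih =>
    intro a b acc
    simp only [pvRunsA]
    split
    · exact ih a x acc
    · rw [ih x x (acc ++ [(a, b)]), ih x x ([] ++ [(a, b)])]; simp

theorem pvGlue_head (b x : Int) (rs : List (Int × Int)) :
    ∃ e t, pvGlue b x rs = (b, e) :: t := by
  cases rs with
  | nil => exact ⟨x, [], rfl⟩
  | cons p t =>
    cases p with
    | mk s e =>
      by_cases h : s = x + 1
      · exact ⟨e, t, by simp [pvGlue, h]⟩
      · exact ⟨x, (s, e) :: t, by simp [pvGlue, h]⟩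

theorem pvRunsA_eq_foldr (l : List Int) : ∀ (a b : Int),
    pvRunsA a b l [] = pvGlue a b (l.foldr pvAddRun []) := by
  induction l with
  | nil => intro a b; rfl
  | cons x t ih =>
    intro a b
    simp only [pvRunsA, List.foldr_cons, pvAddRun_eq_glue]
    by_cases h : x = b + 1
    · subst h
      rw [if_pos rfl, ih a (b + 1)]
      obtain ⟨e, t', ht⟩ := pvGlue_head (b + 1) (b + 1) (t.foldr pvAddRun [])
      rw [ht]
      cases hR : t.foldr pvAddRun [] with
      | nil =>
        rw [hR] at ht
        simp [pvGlue] at ht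
        simp [pvGlue, ht.1, ht.2]
      | cons p t2 =>
        rw [hR] at ht
        cases p with
        | mk s e2 =>
          by_cases hs : s = b + 1 + 1
          · simp [pvGlue, hs] at ht
            simp [pvGlue, ht.1, ht.2, hs]
          · simp [pvGlue, hs] at ht
            obtain ⟨h1, h2⟩ := ht
            subst h2
            subst h1
            simp [pvGlue, hs]
    · rw [if_neg h, pvRunsA_acc, ih x x]
      obtain ⟨e, t', ht⟩ := pvGlue_head x x (t.foldr pvAddRun [])
      rw [ht]
      have hx : ¬ (x = b + 1) := h
      simp [pvGlue, hx]

theorem foldl_parts {α : Type} (f : Int × Int → α) (l : List (Int × Int)) :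
    ∀ (acc : List α), l.foldl (fun ps se => ps ++ [f se]) acc = acc ++ l.map f := by
  induction l with
  | nil => intro acc; simp
  | cons p t ih => intro acc; simp [List.foldl_cons, ih]

-- ===== VERDICT (by name: the statement is the Claim_ definition above) =====
theorem format_para_list_py_spec : Claim_equal_format_para_list_py := by
  intro xs _
  unfold Spec_format_para_list_py format_para_list_py format_para_list_py_alt
  cases xs with
  | nil => rfl
  | cons x0 rest =>
    simp only [List.foldr_cons, pvAddRun_eq_glue]
    rw [show (pvRunsA x0 x0 rest []) = pvGlue x0 x0 (rest.foldr pvAddRun []) from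
      pvRunsA_eq_foldr rest x0 x0]
    obtain ⟨e, t', ht⟩ := pvGlue_head x0 x0 (rest.foldr pvAddRun [])
    rw [ht]
    have hfold := foldl_parts (fun se : Int × Int =>
      if se.1 = se.2 then "【" ++ pvFmt04 se.1 ++ "】"
      else "【" ++ pvFmt04 se.1 ++ "】〜【" ++ pvFmt04 se.2 ++ "】") ((x0, e) :: t') []
    simp only [List.nil_append] at hfold
    have hbody : (fun (ps : List String) (se : Int × Int) =>
        if se.1 = se.2 then ps ++ ["【" ++ pvFmt04 se.1 ++ "】"]
        else ps ++ ["【" ++ pvFmt04 se.1 ++ "】〜【" ++ pvFmt04 se.2 ++ "】"]) =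
        (fun (ps : List String) (se : Int × Int) => ps ++
          [if se.1 = se.2 then "【" ++ pvFmt04 se.1 ++ "】"
           else "【" ++ pvFmt04 se.1 ++ "】〜【" ++ pvFmt04 se.2 ++ "】"]) := by
      funext ps se; split <;> rfl
    simp only [hbody, hfold]
    split <;> rfl
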